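-- pv_equiv track=rewrite | github.com/SteveImmanuel/code-practice | Kickstart/2022 Practice Session 2/building_palindromes.py | count_yes
-- ===== SOURCE A (Python) =====
-- def count_yes(N, Q, blocks, questions):
--   yes_answers = 0
--   mem = {}
--   for question in questions:
--     substr = blocks[question[0] - 1:question[1]]
--     if is_palindrome_possible(substr, mem):
--       yes_answers += 1
--   return yes_answers
--
-- def is_palindrome_possible(substr, mem):
--   if substr in mem:
--     return mem[substr]
--
--   count_dict = {}
--   for char in substr:
--     if char not in count_dict:
--       count_dict[char] = 1
--     else:
--       count_dict[char] += 1
--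
--   occ = list(count_dict.values())
--   i = 0
--   chance = 1
--   while i < len(occ) and chance >= 0:
--     if occ[i] % 2 != 0:
--       chance -= 1
--     i += 1
--
--   if chance >= 0:
--     mem[substr] = True
--   else:
--     mem[substr] = False
--
--   return mem[substr]
-- ===== SOURCE B (Python) =====
-- def count_yes(N, Q, blocks, questions):
--     n = len(blocks)
--     # one prefix-count table per distinct character: tables[c][i] = occurrences of c in blocks[:i]
--     tables = [(c, prefix_counts(c, blocks)) for c in set(blocks)]
--     yes = 0
--     for q in questions:
--         start, stop, _ = slice(q[0] - 1, q[1]).indices(n)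
--         if start >= stop:
--             yes += 1  # empty substring: trivially a palindrome
--         else:
--             odd = sum((run[stop] - run[start]) % 2 for _c, run in tables)
--             if odd <= 1:
--                 yes += 1
--     return yes
--
-- def prefix_counts(c, blocks):
--     run = [0]
--     acc = 0
--     for ch in blocks:
--         acc += (c == ch)
--         run.append(acc)
--     return run
-- ===== Notes on version B (the rewrite author's own statement) =====
-- stated objective: faster
-- what changed: Replaces the per-query character-count-and-scan (with a substring memo dict) by per-character prefix-count tables built once, so each query is answered from O(alphabet) table lookups instead of rebuilding a counter over the substring.
import Mathlib
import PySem

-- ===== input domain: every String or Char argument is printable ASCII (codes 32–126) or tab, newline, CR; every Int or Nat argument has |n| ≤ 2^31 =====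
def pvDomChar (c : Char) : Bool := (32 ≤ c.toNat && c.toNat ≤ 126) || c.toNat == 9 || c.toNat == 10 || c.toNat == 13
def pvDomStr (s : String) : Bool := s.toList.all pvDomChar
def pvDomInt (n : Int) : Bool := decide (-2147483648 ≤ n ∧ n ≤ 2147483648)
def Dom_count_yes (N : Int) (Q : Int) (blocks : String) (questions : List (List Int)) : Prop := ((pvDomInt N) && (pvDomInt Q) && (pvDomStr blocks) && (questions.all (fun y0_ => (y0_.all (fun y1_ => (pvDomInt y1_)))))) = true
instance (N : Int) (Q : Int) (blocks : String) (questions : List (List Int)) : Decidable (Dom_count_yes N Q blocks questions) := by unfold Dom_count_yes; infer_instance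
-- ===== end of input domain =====

-- B replaces A's per-query substring counting (with a substring memo) by per-character
-- prefix-count tables built once, answering each query from O(alphabet) lookups.

-- ===== PORT A =====
-- the `count_dict` loop of is_palindrome_possible
def pvCounter (cs : List Char) : PySem.Dict Char Int :=
  cs.foldl (fun d c => if d.contains c = false then d.insert c 1 else d.insert c (d.getD c 0 + 1)) PySem.Dict.empty

-- the `while i < len(occ) and chance >= 0` loop; result is the final `chance`
def pvOccLoop : List Int → Int → Int
  | [], chance => chance
  | v :: occ, chance =>
      if 0 ≤ chance then pvOccLoop occ (if PySem.Int.mod v 2 ≠ 0 then chance - 1 else chance)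
      else chance

def pvIsPalPossible (substr : List Char) (mem : PySem.Dict (List Char) Bool) :
    Bool × PySem.Dict (List Char) Bool :=
  match mem.get? substr with
  | some b => (b, mem)
  | none =>
      let occ := (pvCounter substr).values
      let chance := pvOccLoop occ 1
      let mem' := if 0 ≤ chance then mem.insert substr true else mem.insert substr false
      (mem'.getD substr false, mem')

def count_yes (N : Int) (Q : Int) (blocks : String) (questions : List (List Int)) : Int :=
  (questions.foldl
    (fun (st : Int × PySem.Dict (List Char) Bool) q =>
      let substr := PySem.List.slice blocks.toList
        (some (PySem.List.pyGetD q 0 0 - 1)) (some (PySem.List.pyGetD q 1 0))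
      let r := pvIsPalPossible substr st.2
      (if r.1 then st.1 + 1 else st.1, r.2))
    (0, PySem.Dict.empty)).1

-- ===== PORT B =====
-- prefix_counts(c, blocks): run[i] = occurrences of c in blocks[:i]
def pvPrefixCounts (c : Char) (blocks : String) : List Int :=
  (blocks.toList.foldl
    (fun (st : List Int × Int) ch =>
      let acc := st.2 + (if c = ch then 1 else 0)
      (st.1 ++ [acc], acc))
    ([0], 0)).1

def count_yes_alt (N : Int) (Q : Int) (blocks : String) (questions : List (List Int)) : Int :=
  let n := blocks.toList.length
  let tables := (PySem.Set.ofList blocks.toList).map (fun c => (c, pvPrefixCounts c blocks))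
  questions.foldl
    (fun yes q =>
      -- slice(q[0]-1, q[1]).indices(n) for step 1 normalises each bound exactly as PySem.List.clampIdx
      let start := PySem.List.clampIdx n (PySem.List.pyGetD q 0 0 - 1)
      let stop := PySem.List.clampIdx n (PySem.List.pyGetD q 1 0)
      if stop ≤ start then yes + 1
      else
        let odd := (tables.map (fun t =>
          PySem.Int.mod (PySem.List.pyGetD t.2 (stop : Int) 0 - PySem.List.pyGetD t.2 (start : Int) 0) 2)).sum
        if odd ≤ 1 then yes + 1 else yes)
    0

-- ===== PRECONDITION & SPEC =====
-- Pre_ excludes exactly the questions lists containing a question with fewer than two entries,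
-- on which A raises IndexError at question[0]/question[1].
def Pre_count_yes (N : Int) (Q : Int) (blocks : String) (questions : List (List Int)) : Prop :=
  ∀ q ∈ questions, 2 ≤ q.length
instance (N : Int) (Q : Int) (blocks : String) (questions : List (List Int)) : Decidable (Pre_count_yes N Q blocks questions) := by unfold Pre_count_yes; infer_instance

def pvWitness_count_yes : Int × Int × String × List (List Int) := (3, 2, "aab", [[1, 3], [2, 3]])

def Spec_count_yes (N : Int) (Q : Int) (blocks : String) (questions : List (List Int)) (out : Int) : Prop := out = count_yes_alt N Q blocks questions
instance (N : Int) (Q : Int) (blocks : String) (questions : List (List Int)) (out : Int) : Decidable (Spec_count_yes N Q blocks questions out) := by unfold Spec_count_yes; infer_instance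

-- ===== CLAIM (what is proved, stated in full; the proofs are below) =====
def Claim_equal_count_yes : Prop := ∀ (N : Int) (Q : Int) (blocks : String) (questions : List (List Int)), Dom_count_yes N Q blocks questions → Pre_count_yes N Q blocks questions → Spec_count_yes N Q blocks questions (count_yes N Q blocks questions)

-- ===== LEMMAS AND PROOFS =====

-- the common specification: at most one character occurs an odd number of times
def pvOddIn (cs : List Char) (c : Char) : Bool := decide (cs.count c % 2 = 1)
def pvPalSpec (cs : List Char) : Bool := decide ((PySem.Set.ofList cs).countP (pvOddIn cs) ≤ 1)

lemma pvOccLoop_nonneg_iff (occ : List Int) (c : Int) :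
    0 ≤ pvOccLoop occ c ↔ (occ.countP (fun v => decide (PySem.Int.mod v 2 ≠ 0)) : Int) ≤ c := by
  induction occ generalizing c with
  | nil => simp [pvOccLoop]
  | cons v occ ih =>
    by_cases hc : 0 ≤ c
    · rw [show pvOccLoop (v :: occ) c
          = pvOccLoop occ (if PySem.Int.mod v 2 ≠ 0 then c - 1 else c) from by
        rw [pvOccLoop]; rw [if_pos hc]]
      rw [List.countP_cons]
      by_cases hv : PySem.Int.mod v 2 ≠ 0
      · rw [if_pos hv, ih]
        have : decide (PySem.Int.mod v 2 ≠ 0) = true := by simpa using hv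
        rw [this]; simp only [if_true]; push_cast; omega
      · rw [if_neg hv, ih]
        have : decide (PySem.Int.mod v 2 ≠ 0) = false := by simpa using hv
        rw [this]; simp
    · rw [show pvOccLoop (v :: occ) c = c from by rw [pvOccLoop]; rw [if_neg hc]]
      rw [List.countP_cons]
      constructor
      · intro h; omega
      · intro h; exfalso
        have h2 : (0:Nat) ≤ (if decide (PySem.Int.mod v 2 ≠ 0) then 1 else 0) := Nat.zero_le _
        push_cast at h; omega
lemma pvCounter_eq (cs : List Char) : pvCounter cs = PySem.Dict.counter cs := by
  rw [pvCounter, show (fun (d : PySem.Dict Char Int) c => if d.contains c = false then d.insert c 1 else d.insert c (d.getD c 0 + 1))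
      = fun d x => d.insert x (d.getD x 0 + 1) from funext fun d => funext fun c => by
    by_cases h : d.contains c
    · simp [h]
    · simp only [Bool.not_eq_true] at h
      rw [if_pos (by rw [h]), PySem.Dict.getD_of_not_contains d 0 h, zero_add]]
  exact PySem.Dict.foldl_insert_getD_add_one_eq_counter cs
lemma pvChance_iff (s : List Char) :
    (0 ≤ pvOccLoop ((pvCounter s).values) 1) ↔ pvPalSpec s = true := by
  rw [pvOccLoop_nonneg_iff, pvCounter_eq]
  have hv : (PySem.Dict.counter s).values
      = (PySem.Set.ofList s).map (fun k => ((s.count k : Nat) : Int)) := by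
    show ((PySem.Dict.counter s).items.map (·.2))
        = (PySem.Set.ofList s).map (fun k => ((s.count k : Nat) : Int))
    rw [PySem.Dict.items_counter, List.map_map]
    rfl
  rw [hv, List.countP_map]
  have hp : ((fun v => decide (PySem.Int.mod v 2 ≠ 0)) ∘ fun k => ((s.count k : Nat) : Int))
      = pvOddIn s := by
    funext k
    simp only [Function.comp, pvOddIn, PySem.Int.mod_eq_emod_of_pos (by norm_num : (0:Int) < 2)]
    rw [decide_eq_decide]
    omega
  rw [hp, pvPalSpec]
  rw [decide_eq_true_eq]
  omega
lemma pvIsPal_val (s : List Char) (mem : PySem.Dict (List Char) Bool)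
    (h : ∀ t b, mem.get? t = some b → b = pvPalSpec t) :
    (pvIsPalPossible s mem).1 = pvPalSpec s := by
  rw [pvIsPalPossible]
  cases hg : mem.get? s with
  | some b => exact h s b hg
  | none =>
    simp only
    by_cases hc : 0 ≤ pvOccLoop ((pvCounter s).values) 1
    · rw [if_pos hc, PySem.Dict.getD_insert_self]
      exact ((pvChance_iff s).mp hc).symm
    · rw [if_neg hc, PySem.Dict.getD_insert_self]
      have hf : pvPalSpec s = false := by
        have := (pvChance_iff s).not.mp hc
        simpa using this
      exact hf.symm
lemma pvIsPal_mem (s : List Char) (mem : PySem.Dict (List Char) Bool)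
    (h : ∀ t b, mem.get? t = some b → b = pvPalSpec t) :
    ∀ t b, (pvIsPalPossible s mem).2.get? t = some b → b = pvPalSpec t := by
  intro t b
  rw [pvIsPalPossible]
  cases hg : mem.get? s with
  | some b' => exact h t b
  | none =>
    simp only
    have key : ∀ (v : Bool), v = pvPalSpec s →
        (mem.insert s v).get? t = some b → b = pvPalSpec t := by
      intro v hv hget
      rw [PySem.Dict.get?_insert] at hget
      by_cases ht : t = s
      · rw [if_pos ht] at hget
        injection hget with hb
        subst hb; subst ht; exact hv
      · rw [if_neg ht] at hget
        exact h t b hget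
    by_cases hc : 0 ≤ pvOccLoop ((pvCounter s).values) 1
    · rw [if_pos hc]
      exact key true ((pvChance_iff s).mp hc).symm
    · rw [if_neg hc]
      refine key false ?_
      have := (pvChance_iff s).not.mp hc
      exact ((by simpa using this : pvPalSpec s = false)).symm
lemma pvPC_aux (c : Char) : ∀ (xs : List Char) (run : List Int) (acc : Int),
    (xs.foldl (fun (st : List Int × Int) ch =>
        (st.1 ++ [st.2 + (if c = ch then 1 else 0)], st.2 + (if c = ch then 1 else 0))) (run, acc)).1
    = run ++ (List.range xs.length).map (fun j => acc + (((xs.take (j+1)).count c : Nat) : Int)) := by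
  intro xs
  induction xs with
  | nil => intro run acc; simp
  | cons x xs ih =>
    intro run acc
    rw [List.foldl_cons, ih]
    rw [List.length_cons, List.range_succ_eq_map, List.map_cons, List.map_map]
    rw [List.append_assoc]
    congr 1
    simp only [List.take_succ_cons, List.take_zero, List.cons_append, List.nil_append]
    congr 1
    · by_cases hcx : c = x <;> simp [hcx, List.count_cons, List.count_nil, eq_comm]
    · apply List.map_congr_left
      intro j _
      simp only [Function.comp_apply]
      by_cases hcx : c = x
      · subst hcx
        rw [List.count_cons_self]
        simp only [Nat.succ_eq_add_one, if_pos rfl]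
        push_cast
        ring
      · rw [List.count_cons_of_ne (Ne.symm hcx)]
        simp only [Nat.succ_eq_add_one, if_neg hcx]
        push_cast
        ring
lemma pvPrefixCounts_eq (c : Char) (blocks : String) :
    pvPrefixCounts c blocks =
      (List.range (blocks.toList.length + 1)).map (fun i => (((blocks.toList.take i).count c : Nat) : Int)) := by
  refine (pvPC_aux c blocks.toList [0] 0).trans ?_
  rw [List.range_succ_eq_map, List.map_cons, List.map_map]
  simp [Function.comp, Nat.succ_eq_add_one]
lemma pvCountP_congr {p : Char → Bool} {l1 l2 : List Char}
    (h1 : l1.Nodup) (h2 : l2.Nodup) (h : ∀ c, p c = true → (c ∈ l1 ↔ c ∈ l2)) :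
    l1.countP p = l2.countP p := by
  rw [List.countP_eq_length_filter, List.countP_eq_length_filter]
  have e1 : (l1.filter p).length = (l1.filter p).toFinset.card :=
    (List.toFinset_card_of_nodup (h1.filter p)).symm
  have e2 : (l2.filter p).length = (l2.filter p).toFinset.card :=
    (List.toFinset_card_of_nodup (h2.filter p)).symm
  rw [e1, e2]
  congr 1
  ext c
  simp only [List.mem_toFinset, List.mem_filter]
  constructor
  · rintro ⟨hm, hp⟩; exact ⟨(h c hp).mp hm, hp⟩
  · rintro ⟨hm, hp⟩; exact ⟨(h c hp).mpr hm, hp⟩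
lemma pvQuery_eq (blocks : String) (a b : Int) (yes : Int) :
    (if PySem.List.clampIdx blocks.toList.length b ≤ PySem.List.clampIdx blocks.toList.length a then yes + 1
     else if (((PySem.Set.ofList blocks.toList).map (fun c => (c, pvPrefixCounts c blocks))).map (fun t =>
         PySem.Int.mod (PySem.List.pyGetD t.2 ((PySem.List.clampIdx blocks.toList.length b : Nat) : Int) 0 -
           PySem.List.pyGetD t.2 ((PySem.List.clampIdx blocks.toList.length a : Nat) : Int) 0) 2)).sum ≤ 1
       then yes + 1 else yes)
    = (if pvPalSpec (PySem.List.slice blocks.toList (some a) (some b)) then yes + 1 else yes) := by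
  have hslice : PySem.List.slice blocks.toList (some a) (some b)
      = List.take (PySem.List.clampIdx blocks.toList.length b - PySem.List.clampIdx blocks.toList.length a)
          (List.drop (PySem.List.clampIdx blocks.toList.length a) blocks.toList) := rfl
  set xs := blocks.toList with hxs
  set A := PySem.List.clampIdx xs.length a with hA
  set B := PySem.List.clampIdx xs.length b with hB
  by_cases hAB : B ≤ A
  · rw [if_pos hAB]
    have hsub : PySem.List.slice xs (some a) (some b) = [] := by
      rw [hslice, Nat.sub_eq_zero_of_le hAB, List.take_zero]
    rw [hsub]
    have : pvPalSpec [] = true := by decide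
    rw [this, if_pos rfl]
  · rw [if_neg hAB]
    set sub := List.take (B - A) (List.drop A xs) with hsubdef
    have hALeB : A ≤ B := le_of_not_ge hAB
    have hBn : B < xs.length + 1 := by have := PySem.List.clampIdx_le xs.length b; omega
    have hAn : A < xs.length + 1 := by have := PySem.List.clampIdx_le xs.length a; omega
    have hsplit : xs.take B = xs.take A ++ sub := by
      rw [hsubdef, ← List.take_add, Nat.add_sub_cancel' hALeB]
    have hfun : ∀ c : Char,
        PySem.Int.mod (PySem.List.pyGetD (pvPrefixCounts c blocks) ((B : Nat) : Int) 0 -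
          PySem.List.pyGetD (pvPrefixCounts c blocks) ((A : Nat) : Int) 0) 2
        = if pvOddIn sub c then (1 : Int) else 0 := by
      intro c
      rw [pvPrefixCounts_eq, PySem.List.pyGetD_natCast, PySem.List.pyGetD_natCast,
        PySem.List.getD_map_range _ _ _ _ hBn, PySem.List.getD_map_range _ _ _ _ hAn,
        ← hxs, hsplit, List.count_append,
        PySem.Int.mod_eq_emod_of_pos (by norm_num : (0:Int) < 2)]
      split_ifs with hodd
      · simp only [pvOddIn, decide_eq_true_eq] at hodd
        push_cast
        omega
      · simp only [pvOddIn, decide_eq_true_eq] at hodd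
        push_cast
        omega
    rw [List.map_map]
    rw [show ((fun t : Char × List Int =>
        PySem.Int.mod (PySem.List.pyGetD t.2 ((B : Nat) : Int) 0 -
          PySem.List.pyGetD t.2 ((A : Nat) : Int) 0) 2) ∘ fun c => (c, pvPrefixCounts c blocks))
        = fun c => if pvOddIn sub c then (1 : Int) else 0 from funext fun c => hfun c]
    rw [PySem.List.sum_map_ite_one_zero]
    have hmem : ∀ c, pvOddIn sub c = true →
        (c ∈ PySem.Set.ofList xs ↔ c ∈ PySem.Set.ofList sub) := by
      intro c hp
      rw [PySem.Set.mem_ofList, PySem.Set.mem_ofList]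
      simp only [pvOddIn, decide_eq_true_eq] at hp
      have hcnt : 0 < sub.count c := by omega
      have hcmem : c ∈ sub := by
        by_contra hne
        rw [List.count_eq_zero_of_not_mem hne] at hcnt
        omega
      constructor
      · intro _; exact hcmem
      · intro _
        exact List.mem_of_mem_drop (List.mem_of_mem_take (hsubdef ▸ hcmem))
    rw [pvCountP_congr (PySem.Set.nodup_ofList xs) (PySem.Set.nodup_ofList sub) hmem]
    rw [hslice]
    by_cases hle : (PySem.Set.ofList sub).countP (pvOddIn sub) ≤ 1
    · rw [if_pos (by exact_mod_cast hle), if_pos (by rw [pvPalSpec]; exact decide_eq_true hle)]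
    · rw [if_neg (by exact_mod_cast hle), if_neg (by
        rw [pvPalSpec]
        simpa using hle)]
lemma pvFoldA (blocks : String) : ∀ (qs : List (List Int)) (yes : Int)
    (mem : PySem.Dict (List Char) Bool),
    (∀ t b, mem.get? t = some b → b = pvPalSpec t) →
    (qs.foldl
      (fun (st : Int × PySem.Dict (List Char) Bool) q =>
        ((if (pvIsPalPossible (PySem.List.slice blocks.toList
            (some (PySem.List.pyGetD q 0 0 - 1)) (some (PySem.List.pyGetD q 1 0))) st.2).1
          then st.1 + 1 else st.1),
         (pvIsPalPossible (PySem.List.slice blocks.toList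
            (some (PySem.List.pyGetD q 0 0 - 1)) (some (PySem.List.pyGetD q 1 0))) st.2).2))
      (yes, mem)).1
    = yes + ((qs.countP (fun q => pvPalSpec (PySem.List.slice blocks.toList
        (some (PySem.List.pyGetD q 0 0 - 1)) (some (PySem.List.pyGetD q 1 0))))) : Int) := by
  intro qs
  induction qs with
  | nil => intro yes mem _; simp
  | cons q qs ih =>
    intro yes mem h
    rw [List.foldl_cons, List.countP_cons]
    have hval := pvIsPal_val (PySem.List.slice blocks.toList
        (some (PySem.List.pyGetD q 0 0 - 1)) (some (PySem.List.pyGetD q 1 0))) mem h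
    have hmem := pvIsPal_mem (PySem.List.slice blocks.toList
        (some (PySem.List.pyGetD q 0 0 - 1)) (some (PySem.List.pyGetD q 1 0))) mem h
    rw [ih _ _ hmem]
    rw [hval]
    by_cases hp : pvPalSpec (PySem.List.slice blocks.toList
        (some (PySem.List.pyGetD q 0 0 - 1)) (some (PySem.List.pyGetD q 1 0))) = true
    · rw [hp]; simp; push_cast; ring
    · rw [Bool.not_eq_true] at hp; rw [hp]; simp

-- ===== VERDICT (by name: the statement is the Claim_ definition above) =====
theorem count_yes_spec : Claim_equal_count_yes := by
  intro N Q blocks questions _hDom _hPre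
  show count_yes N Q blocks questions = count_yes_alt N Q blocks questions
  have hA : count_yes N Q blocks questions
      = 0 + ((questions.countP (fun q => pvPalSpec (PySem.List.slice blocks.toList
          (some (PySem.List.pyGetD q 0 0 - 1)) (some (PySem.List.pyGetD q 1 0))))) : Int) := by
    refine Eq.trans ?_ (pvFoldA blocks questions 0 PySem.Dict.empty ?_)
    · rfl
    · intro t b hb
      rw [PySem.Dict.get?_empty] at hb
      cases hb
  have hB : count_yes_alt N Q blocks questions
      = 0 + ((questions.countP (fun q => pvPalSpec (PySem.List.slice blocks.toList
          (some (PySem.List.pyGetD q 0 0 - 1)) (some (PySem.List.pyGetD q 1 0))))) : Int) := by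
    have hstep : (fun (yes : Int) (q : List Int) =>
        if PySem.List.clampIdx blocks.toList.length (PySem.List.pyGetD q 1 0) ≤
            PySem.List.clampIdx blocks.toList.length (PySem.List.pyGetD q 0 0 - 1) then yes + 1
        else if (((PySem.Set.ofList blocks.toList).map (fun c => (c, pvPrefixCounts c blocks))).map (fun t =>
            PySem.Int.mod (PySem.List.pyGetD t.2 ((PySem.List.clampIdx blocks.toList.length (PySem.List.pyGetD q 1 0) : Nat) : Int) 0 -
              PySem.List.pyGetD t.2 ((PySem.List.clampIdx blocks.toList.length (PySem.List.pyGetD q 0 0 - 1) : Nat) : Int) 0) 2)).sum ≤ 1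
          then yes + 1 else yes)
        = fun (yes : Int) (q : List Int) =>
            if pvPalSpec (PySem.List.slice blocks.toList
              (some (PySem.List.pyGetD q 0 0 - 1)) (some (PySem.List.pyGetD q 1 0))) then yes + 1 else yes :=
      funext fun yes => funext fun q =>
        pvQuery_eq blocks (PySem.List.pyGetD q 0 0 - 1) (PySem.List.pyGetD q 1 0) yes
    calc count_yes_alt N Q blocks questions
        = questions.foldl (fun (yes : Int) (q : List Int) =>
            if pvPalSpec (PySem.List.slice blocks.toList
              (some (PySem.List.pyGetD q 0 0 - 1)) (some (PySem.List.pyGetD q 1 0))) then yes + 1 else yes) 0 := by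
          show questions.foldl _ 0 = _
          rw [hstep]
      _ = 0 + _ := PySem.List.foldl_if_add_one _ _ _
  rw [hA, hB]
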